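-- pv_equiv track=rewrite | github.com/ArminMemar/CantorCipher | cantor_cipher.py | cantor_encrypt
-- ===== SOURCE A (Python) =====
-- def str_to_bits(s):
--     return ''.join(format(ord(c), '08b') for c in s)
--
-- def boolean_mix(a, b):
--     # Boolean logic-based nonlinear mixing
--     return ''.join(str(((int(x) & ~int(y)) | (int(x) ^ int(y))) & 1) for x, y in zip(a, b))
--
-- def cantor_encrypt(message, key):
--     msg_bits = str_to_bits(message)
--     key_bits = str_to_bits(key)
--
--     while len(key_bits) < len(msg_bits):
--         key_bits += key_bits
--     key_bits = key_bits[:len(msg_bits)]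
--
--     encrypted_bits = boolean_mix(msg_bits, key_bits)  # Boolean logic encryption
--     return encrypted_bits
-- ===== SOURCE B (Python) =====
-- def cantor_encrypt(message, key):
--     # One pass over the characters: the bit-level "boolean mix" is XOR, and the
--     # doubling/truncation makes the key cyclic per character.
--     out = []
--     for i in range(len(message)):
--         out.append(format(ord(message[i]) ^ ord(key[i % len(key)]), '08b'))
--     return ''.join(out)
-- ===== Notes on version B (the rewrite author's own statement) =====
-- stated objective: simpler
-- what changed: B replaces the bit-string construction, the key-doubling loop and the per-bit boolean formula by a single per-character pass that XORs each message byte with the cyclically indexed key byte and formats it as 8 bits; it does byte-level work instead of A's per-bit string churn.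
import Mathlib
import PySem

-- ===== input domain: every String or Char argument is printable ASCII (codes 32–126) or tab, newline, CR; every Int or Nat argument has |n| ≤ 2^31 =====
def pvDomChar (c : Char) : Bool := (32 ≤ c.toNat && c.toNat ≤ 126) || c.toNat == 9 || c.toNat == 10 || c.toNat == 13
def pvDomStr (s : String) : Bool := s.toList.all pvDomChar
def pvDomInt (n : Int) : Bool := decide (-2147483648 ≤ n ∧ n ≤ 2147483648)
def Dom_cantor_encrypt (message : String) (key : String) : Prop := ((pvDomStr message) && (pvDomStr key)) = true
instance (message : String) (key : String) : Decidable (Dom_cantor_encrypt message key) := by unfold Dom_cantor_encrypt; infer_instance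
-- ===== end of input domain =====

-- B repeats A's encryption as one per-character pass (byte XOR with the cyclically
-- indexed key byte) instead of A's bit-string construction, key-doubling loop and
-- per-bit boolean formula; objective: simpler.

-- format(n, '08b'): the 8 binary digits of n, most significant first (exact for n < 256,
-- which covers every value formatted by either program on the stated domain: ASCII codes
-- and XORs of ASCII codes).
def bits8 (n : Nat) : List Char :=
  (List.range 8).map (fun k => if n.testBit (7 - k) then '1' else '0')

-- ===== PORT A =====
-- ''.join(format(ord(c), '08b') for c in s); the joined bit characters are kept as List Char.
def str_to_bits (s : String) : List Char :=
  s.toList.flatMap (fun c => bits8 c.toNat)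

-- int(x) for the single bit character x ('0' or '1'): its digit value.
def bitInt (c : Char) : Int := (c.toNat : Int) - 48

-- ''.join(str(((int(x) & ~int(y)) | (int(x) ^ int(y))) & 1) for x, y in zip(a, b));
-- str of the resulting 0/1 int is its digit character.
def boolean_mix (a : List Char) (b : List Char) : List Char :=
  (a.zip b).map (fun p =>
    if PySem.Int.band
        (PySem.Int.bor (PySem.Int.band (bitInt p.1) (Int.not (bitInt p.2)))
                       (PySem.Int.bxor (bitInt p.1) (bitInt p.2))) 1 = 1
    then '1' else '0')

-- while len(key_bits) < len(msg_bits): key_bits += key_bits — fuel-bounded only to make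
-- the definition total; fuel n suffices whenever the Python loop terminates (key ≠ '').
def dblLoop (fuel : Nat) (kb : List Char) (n : Nat) : List Char :=
  match fuel with
  | 0 => kb
  | f + 1 => if kb.length < n then dblLoop f (kb ++ kb) n else kb

def cantor_encrypt (message : String) (key : String) : String :=
  let msg_bits := str_to_bits message
  let key_bits := dblLoop msg_bits.length (str_to_bits key) msg_bits.length
  let key_bits := key_bits.take msg_bits.length   -- key_bits[:len(msg_bits)]
  String.ofList (boolean_mix msg_bits key_bits)

-- ===== PORT B =====
def cantor_encrypt_alt (message : String) (key : String) : String :=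
  let ms := message.toList
  let ks := key.toList
  -- for i in range(len(message)): out.append(format(ord(message[i]) ^ ord(key[i % len(key)]), '08b'))
  String.ofList
    (((List.range ms.length).map
        (fun i => bits8 ((ms.getD i ' ').toNat ^^^ (ks.getD (i % ks.length) ' ').toNat))).flatten)

-- ===== PRECONDITION & SPEC =====
-- Pre_ excludes non-empty message with empty key: there A's doubling loop never
-- terminates (Python diverges, returning nothing), while B raises ZeroDivisionError.
def Pre_cantor_encrypt (message : String) (key : String) : Prop :=
  message = "" ∨ key ≠ ""
instance (message : String) (key : String) : Decidable (Pre_cantor_encrypt message key) := by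
  unfold Pre_cantor_encrypt; infer_instance

def pvWitness_cantor_encrypt : String × String := ("AB", "k")

def Spec_cantor_encrypt (message : String) (key : String) (out : String) : Prop := out = cantor_encrypt_alt message key
instance (message : String) (key : String) (out : String) : Decidable (Spec_cantor_encrypt message key out) := by unfold Spec_cantor_encrypt; infer_instance

-- ===== CLAIM (what is proved, stated in full; the proofs are below) =====
def Claim_equal_cantor_encrypt : Prop := ∀ (message : String) (key : String), Dom_cantor_encrypt message key → Pre_cantor_encrypt message key → Spec_cantor_encrypt message key (cantor_encrypt message key)

-- ===== LEMMAS AND PROOFS =====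

theorem length_bits8 (n : Nat) : (bits8 n).length = 8 := by
  simp [bits8]

theorem length_str_to_bits (s : String) :
    (str_to_bits s).length = 8 * s.toList.length := by
  have h : ∀ l : List Char, (l.flatMap (fun c => bits8 c.toNat)).length = 8 * l.length := by
    intro l
    induction l with
    | nil => simp
    | cons c t ih => simp [List.flatMap_cons, ih, length_bits8]; ring
  simpa [str_to_bits] using h s.toList

-- doubling kb is the same bit stream as doubling the number of copies of kb
theorem flatten_replicate_self_append (m : Nat) (l : List Char) :
    (List.replicate m (l ++ l)).flatten = (List.replicate (2 * m) l).flatten := by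
  induction m with
  | zero => simp
  | succ m ih =>
    have h2 : 2 * (m + 1) = (2 * m) + 1 + 1 := by ring
    simp [List.replicate_succ, h2, ih, List.append_assoc]

-- the doubling loop returns some number of copies of kb, enough to cover n
theorem dblLoop_spec (fuel : Nat) (kb : List Char) (n : Nat)
    (hkb : kb ≠ []) (hf : n ≤ 2 ^ fuel * kb.length) :
    ∃ m, 1 ≤ m ∧ dblLoop fuel kb n = (List.replicate m kb).flatten ∧ n ≤ m * kb.length := by
  induction fuel generalizing kb with
  | zero =>
    refine ⟨1, le_refl 1, by simp [dblLoop], ?_⟩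
    simpa using hf
  | succ f ih =>
    by_cases h : kb.length < n
    · obtain ⟨m, hm1, heq, hle⟩ := ih (kb ++ kb) (by simp [hkb])
        (by
          calc n ≤ 2 ^ (f + 1) * kb.length := hf
            _ = 2 ^ f * (kb ++ kb).length := by simp [List.length_append, pow_succ]; ring)
      refine ⟨2 * m, by omega, ?_, ?_⟩
      · simp only [dblLoop, if_pos h, heq, flatten_replicate_self_append]
      · calc n ≤ m * (kb ++ kb).length := hle
          _ = 2 * m * kb.length := by simp [List.length_append]; ring
    · exact ⟨1, le_refl 1, by simp [dblLoop, h], by simp; omega⟩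

-- cyclic indexing into repeated copies
theorem getElem?_flatten_replicate (m : Nat) (l : List Char) (i : Nat)
    (hi : i < m * l.length) :
    ((List.replicate m l).flatten)[i]? = l[i % l.length]? := by
  induction m generalizing i with
  | zero => simp at hi
  | succ m ih =>
    have hrep : (List.replicate (m + 1) l).flatten = l ++ (List.replicate m l).flatten := by
      simp [List.replicate_succ]
    rw [hrep]
    by_cases h : i < l.length
    · rw [List.getElem?_append_left h, Nat.mod_eq_of_lt h]
    · have hl : l.length ≤ i := Nat.le_of_not_lt h
      have hi' : i - l.length < m * l.length := by
        have hx : (m + 1) * l.length = m * l.length + l.length := by ring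
        omega
      rw [List.getElem?_append_right hl, ih (i - l.length) hi', Nat.mod_eq_sub_mod hl]

-- repetition commutes with per-character bit expansion
theorem flatten_replicate_flatMap (m : Nat) (l : List Char) (g : Char → List Char) :
    (List.replicate m (l.flatMap g)).flatten = ((List.replicate m l).flatten).flatMap g := by
  induction m with
  | zero => simp
  | succ m ih => simp [List.replicate_succ, List.flatMap_append, ih]

-- taking a multiple of 8 bits is taking whole characters
theorem take_mul8_flatMap (n : Nat) (l : List Char) (g : Char → List Char)
    (hg : ∀ a, (g a).length = 8) (hn : n ≤ l.length) :
    (l.flatMap g).take (8 * n) = (l.take n).flatMap g := by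
  induction n generalizing l with
  | zero => simp
  | succ n ih =>
    cases l with
    | nil => simp at hn
    | cons a t =>
      have e1 : (g a).take (8 * (n + 1)) = g a := List.take_of_length_le (by rw [hg]; omega)
      have e2 : 8 * (n + 1) - (g a).length = 8 * n := by rw [hg]; omega
      simp only [List.flatMap_cons, List.take_succ_cons, List.take_append, e1, e2,
        ih t (by simpa using hn)]

-- boolean_mix works blockwise on aligned 8-bit blocks
theorem boolean_mix_flatMap (g : Char → List Char) (hg : ∀ a, (g a).length = 8) :
    ∀ (xs ys : List Char), xs.length = ys.length →
    boolean_mix (xs.flatMap g) (ys.flatMap g)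
      = (List.zipWith (fun c d => boolean_mix (g c) (g d)) xs ys).flatten := by
  intro xs
  induction xs with
  | nil =>
    intro ys h
    cases ys with
    | nil => simp [boolean_mix]
    | cons d ys => simp at h
  | cons c xs ih =>
    intro ys h
    cases ys with
    | nil => simp at h
    | cons d ys =>
      simp only [List.flatMap_cons, List.zipWith_cons_cons, List.flatten_cons]
      unfold boolean_mix
      rw [List.zip_append (by rw [hg, hg]), List.map_append]
      have := ih ys (by simpa using h)
      unfold boolean_mix at this
      rw [this]

-- on one 8-bit block the boolean formula is exactly XOR
theorem boolean_mix_bits8 (a b : Nat) :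
    boolean_mix (bits8 a) (bits8 b) = bits8 (a ^^^ b) := by
  unfold boolean_mix bits8
  rw [List.zip_map', List.map_map]
  apply List.map_congr_left
  intro k hk
  cases ha : a.testBit (7 - k) <;> cases hb : b.testBit (7 - k) <;>
    simp [Function.comp, Nat.testBit_xor, ha, hb, bitInt] <;> decide

theorem cantor_encrypt_eq_alt (message key : String) (hk : key.toList ≠ []) :
    cantor_encrypt message key = cantor_encrypt_alt message key := by
  have hK : 0 < key.toList.length := List.length_pos_of_ne_nil hk
  have hg : ∀ a : Char, (bits8 a.toNat).length = 8 := fun a => length_bits8 _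
  have hkbl : (str_to_bits key).length = 8 * key.toList.length := length_str_to_bits key
  have hkb : str_to_bits key ≠ [] := by
    intro hnil
    have h0 : (str_to_bits key).length = 0 := by rw [hnil]; rfl
    omega
  have hmsg : (str_to_bits message).length = 8 * message.toList.length :=
    length_str_to_bits message
  obtain ⟨m, hm1, heq, hcov⟩ := dblLoop_spec (str_to_bits message).length (str_to_bits key)
      (str_to_bits message).length hkb
      (by
        calc (str_to_bits message).length
            ≤ 2 ^ (str_to_bits message).length := Nat.le_of_lt Nat.lt_two_pow_self
          _ ≤ 2 ^ (str_to_bits message).length * (str_to_bits key).length :=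
              Nat.le_mul_of_pos_right _ (by omega))
  have hNmK : message.toList.length ≤ m * key.toList.length := by
    have h1 : m * (str_to_bits key).length = 8 * (m * key.toList.length) := by rw [hkbl]; ring
    omega
  have hS : ((List.replicate m key.toList).flatten).length = m * key.toList.length := by
    simp [List.length_flatten, List.map_replicate]
  have hT : (((List.replicate m key.toList).flatten).take message.toList.length).length
      = message.toList.length := by
    rw [List.length_take]
    omega
  show String.ofList (boolean_mix (str_to_bits message)
      ((dblLoop (str_to_bits message).length (str_to_bits key)
        (str_to_bits message).length).take (str_to_bits message).length))
    = cantor_encrypt_alt message key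
  rw [heq]
  have e1 : (List.replicate m (str_to_bits key)).flatten
      = ((List.replicate m key.toList).flatten).flatMap (fun c => bits8 c.toNat) :=
    flatten_replicate_flatMap m key.toList _
  rw [e1, hmsg, take_mul8_flatMap message.toList.length _ _ hg (by omega)]
  have e2 := boolean_mix_flatMap (fun c => bits8 c.toNat) hg message.toList
      (((List.replicate m key.toList).flatten).take message.toList.length) (by rw [hT])
  have hstb : str_to_bits message = message.toList.flatMap (fun c => bits8 c.toNat) := rfl
  rw [hstb, e2]
  simp only [boolean_mix_bits8]
  have halt : cantor_encrypt_alt message key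
      = String.ofList (((List.range message.toList.length).map
          (fun i => bits8 ((message.toList.getD i ' ').toNat ^^^
            (key.toList.getD (i % key.toList.length) ' ').toNat))).flatten) := rfl
  rw [halt]
  apply congrArg String.ofList
  apply congrArg List.flatten
  apply List.ext_getElem
  · rw [List.length_zipWith, hT, List.length_map, List.length_range, Nat.min_self]
  · intro i h1 h2
    have hiN : i < message.toList.length := by simpa using h2
    have hiS : i < m * key.toList.length := by omega
    have hmod : i % key.toList.length < key.toList.length := Nat.mod_lt _ hK
    have hTi : (((List.replicate m key.toList).flatten).take message.toList.length)[i]'(by omega)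
        = key.toList[i % key.toList.length]'hmod := by
      have hgetS : ((List.replicate m key.toList).flatten)[i]? =
          key.toList[i % key.toList.length]? := getElem?_flatten_replicate m key.toList i hiS
      have h3 : i < ((List.replicate m key.toList).flatten).length := by omega
      rw [List.getElem_take]
      have := hgetS
      rw [List.getElem?_eq_getElem h3, List.getElem?_eq_getElem hmod] at this
      exact Option.some.inj this
    simp only [List.getElem_zipWith, List.getElem_map, List.getElem_range]
    rw [hTi, List.getD_eq_getElem _ _ hiN, List.getD_eq_getElem _ _ hmod]

-- ===== VERDICT (by name: the statement is the Claim_ definition above) =====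
theorem cantor_encrypt_spec : Claim_equal_cantor_encrypt := by
  intro message key _ hpre
  unfold Spec_cantor_encrypt
  rcases hpre with hm | hk
  · subst hm
    simp [cantor_encrypt, cantor_encrypt_alt, str_to_bits, boolean_mix, dblLoop]
  · exact cantor_encrypt_eq_alt message key (by simpa [String.toList_eq_nil_iff] using hk)
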